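-- pv_equiv track=rewrite | github.com/KimGaHyeon/algorithm | programmers/탐욕법/42862(2).py | solution
-- ===== SOURCE A (Python) =====
-- def solution(n, lost, reserve):
--     # 여벌이 있던 학생 중 안 잃어버린 학생 (빌려줄수 있는 학생)
--     _reserve = [r for r in reserve if r not in lost]
--     # 체육복을 잃어버린 학생 중 여벌이 없는 학생 (빌려야 하는 학생)
--     _lost = [l for l in lost if l not in reserve]
--     _reserve.sort()
--     _lost.sort()
--     for r in _reserve:
--         if r-1 in _lost:
--             _lost.remove(r-1)
--         elif r+1 in _lost:
--             _lost.remove(r+1)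
--     return n - len(_lost)
-- ===== SOURCE B (Python) =====
-- def solution(n, lost, reserve):
--     lost_set = set(lost)
--     reserve_set = set(reserve)
--     L = sorted(l for l in lost if l not in reserve_set)
--     R = sorted(r for r in reserve if r not in lost_set)
--     i = m = 0
--     for r in R:
--         while i < len(L) and L[i] < r - 1:
--             i += 1
--         if i < len(L) and (L[i] == r - 1 or L[i] == r + 1):
--             i += 1
--             m += 1
--     return n - (len(L) - m)
-- ===== Notes on version B (the rewrite author's own statement) =====
-- stated objective: faster
-- what changed: Replaced A's quadratic list-membership filters and scan-and-remove loop with set-based filtering and a single two-pointer sweep over the two sorted lists that counts matches instead of mutating the lost list.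
import Mathlib
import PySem

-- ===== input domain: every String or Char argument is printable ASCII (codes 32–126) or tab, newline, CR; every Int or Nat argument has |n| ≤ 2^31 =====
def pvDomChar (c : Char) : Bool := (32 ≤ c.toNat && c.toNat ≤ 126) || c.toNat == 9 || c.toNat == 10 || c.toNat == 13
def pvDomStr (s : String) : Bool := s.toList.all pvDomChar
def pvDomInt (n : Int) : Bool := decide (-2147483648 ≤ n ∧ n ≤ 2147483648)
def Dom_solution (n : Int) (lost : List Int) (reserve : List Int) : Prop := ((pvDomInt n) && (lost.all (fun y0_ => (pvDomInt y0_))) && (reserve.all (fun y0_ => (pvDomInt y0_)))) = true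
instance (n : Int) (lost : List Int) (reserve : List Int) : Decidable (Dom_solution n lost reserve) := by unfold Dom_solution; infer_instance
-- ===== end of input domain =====

-- B replaces A's quadratic scan-and-remove loop by a sorted two-pointer sweep (O(n log n)); return values proved equal.

-- ===== PORT A =====
-- the loop body: 'if r-1 in _lost: _lost.remove(r-1) elif r+1 in _lost: _lost.remove(r+1)'
-- (list.remove under the 'in' guard removes the first occurrence = List.erase)
def stepA (L : List Int) (r : Int) : List Int :=
  if L.contains (r - 1) then L.erase (r - 1)
  else if L.contains (r + 1) then L.erase (r + 1)
  else L

def solution (n : Int) (lost : List Int) (reserve : List Int) : Int :=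
  let _reserve := reserve.filter (fun r => !(lost.contains r))
  let _lost := lost.filter (fun l => !(reserve.contains l))
  let _reserveS := PySem.List.sorted _reserve (fun x => x) false
  let _lostS := PySem.List.sorted _lost (fun x => x) false
  let final := _reserveS.foldl stepA _lostS
  n - (final.length : Int)

-- ===== PORT B =====
-- inner 'while i < len(L) and L[i] < r - 1: i += 1'
def whileSkip (L : List Int) (r : Int) (i : Nat) : Nat :=
  if h : i < L.length then
    if L[i] < r - 1 then whileSkip L r (i + 1) else i
  else i
termination_by L.length - i

-- body of 'for r in R' over state (i, m)
def stepB (L : List Int) (st : Nat × Int) (r : Int) : Nat × Int :=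
  let i := whileSkip L r st.1
  if h : i < L.length then
    if L[i] = r - 1 ∨ L[i] = r + 1 then (i + 1, st.2 + 1) else (i, st.2)
  else (i, st.2)

def solution_alt (n : Int) (lost : List Int) (reserve : List Int) : Int :=
  let lostSet := PySem.Set.ofList lost
  let reserveSet := PySem.Set.ofList reserve
  let L := PySem.List.sorted (lost.filter (fun l => !(PySem.Set.contains reserveSet l))) (fun x => x) false
  let R := PySem.List.sorted (reserve.filter (fun r => !(PySem.Set.contains lostSet r))) (fun x => x) false
  let st := R.foldl (stepB L) (0, 0)
  n - ((L.length : Int) - st.2)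

-- ===== PRECONDITION & SPEC =====
def Spec_solution (n : Int) (lost : List Int) (reserve : List Int) (out : Int) : Prop := out = solution_alt n lost reserve
instance (n : Int) (lost : List Int) (reserve : List Int) (out : Int) : Decidable (Spec_solution n lost reserve out) := by unfold Spec_solution; infer_instance

-- ===== CLAIM (what is proved, stated in full; the proofs are below) =====
def Claim_equal_solution : Prop := ∀ (n : Int) (lost : List Int) (reserve : List Int), Dom_solution n lost reserve → Spec_solution n lost reserve (solution n lost reserve)

-- ===== LEMMAS AND PROOFS =====

-- reference count: matched pairs of the greedy, on sorted L and R
def go : List Int → List Int → Nat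
  | _, [] => 0
  | L, r :: R' =>
    match L.dropWhile (fun x => decide (x < r - 1)) with
    | [] => go [] R'
    | x :: t => if x = r - 1 ∨ x = r + 1 then go t R' + 1 else go (x :: t) R'

theorem go_cons (L : List Int) (r : Int) (R' : List Int) :
    go L (r :: R') = (match L.dropWhile (fun x => decide (x < r - 1)) with
      | [] => go [] R'
      | x :: t => if x = r - 1 ∨ x = r + 1 then go t R' + 1 else go (x :: t) R') := rfl

theorem go_cons_nil (L : List Int) (r : Int) (R' : List Int)
    (h : L.dropWhile (fun x => decide (x < r - 1)) = []) :
    go L (r :: R') = go [] R' := by rw [go_cons, h]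

theorem go_cons_cons (L : List Int) (r : Int) (R' : List Int) (x : Int) (t : List Int)
    (h : L.dropWhile (fun x => decide (x < r - 1)) = x :: t) :
    go L (r :: R') = if x = r - 1 ∨ x = r + 1 then go t R' + 1 else go (x :: t) R' := by
  rw [go_cons, h]

theorem go_nil (R : List Int) : go [] R = 0 := by
  induction R with
  | nil => rfl
  | cons r R' ih => rw [go_cons]; simpa using ih

theorem foldlA_length (R : List Int) : ∀ (L P : List Int),
    (∀ p ∈ P, ∀ r ∈ R, p < r - 1) →
    L.Pairwise (· ≤ ·) →
    R.Pairwise (· ≤ ·) →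
    (∀ r ∈ R, r ∉ L) →
    (R.foldl stepA (P ++ L)).length + go L R = P.length + L.length := by
  induction R with
  | nil => intro L P _ _ _ _; simp [go]
  | cons r R' ih =>
    intro L P hP hL hR hdisj
    have hRle : ∀ r' ∈ R', r ≤ r' := (List.pairwise_cons.mp hR).1
    have hR' : R'.Pairwise (· ≤ ·) := (List.pairwise_cons.mp hR).2
    have hsplit : L.takeWhile (fun x : Int => decide (x < r - 1)) ++ L.dropWhile (fun x : Int => decide (x < r - 1)) = L := List.takeWhile_append_dropWhile
    have hTlt : ∀ t ∈ L.takeWhile (fun x : Int => decide (x < r - 1)), t < r - 1 := by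
      intro t ht; have := List.mem_takeWhile_imp ht; simpa using this
    have hPlt : ∀ q ∈ P, q < r - 1 := fun q hq => hP q hq r (by simp)
    have hL'pw : (L.dropWhile (fun x : Int => decide (x < r - 1))).Pairwise (· ≤ ·) :=
      hL.sublist (List.dropWhile_sublist _)
    have hmemL : ∀ y ∈ L.dropWhile (fun x : Int => decide (x < r - 1)), y ∈ L :=
      fun y hy => (List.dropWhile_sublist _).subset hy
    rw [List.foldl_cons]
    rcases hdw : L.dropWhile (fun x : Int => decide (x < r - 1)) with _ | ⟨x, t⟩
    · -- dropWhile = []: every element of P ++ L is < r - 1, step is a no-op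
      have hall : ∀ y ∈ P ++ L, y < r - 1 := by
        intro y hy
        rcases List.mem_append.mp hy with h1 | h1
        · exact hPlt y h1
        · rw [← hsplit, hdw, List.append_nil] at h1; exact hTlt y h1
      have hnc1 : (P ++ L).contains (r - 1) = false := by
        simp only [List.contains_eq_mem, decide_eq_false_iff_not]
        intro hmem; have := hall _ hmem; omega
      have hnc2 : (P ++ L).contains (r + 1) = false := by
        simp only [List.contains_eq_mem, decide_eq_false_iff_not]
        intro hmem; have := hall _ hmem; omega
      have hstep : stepA (P ++ L) r = P ++ L := by unfold stepA; rw [hnc1, hnc2]; simp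
      rw [hstep, go_cons_nil L r R' hdw, go_nil]
      have := ih [] (P ++ L)
        (by intro q hq r' hr'; have := hall q hq; have := hRle r' hr'; omega)
        (by simp) hR' (by simp)
      simpa [go_nil] using this
    · rw [hdw] at hL'pw hmemL
      have hxL : x ∈ L := hmemL x (by simp)
      have hne : L.dropWhile (fun x : Int => decide (x < r - 1)) ≠ [] := by rw [hdw]; simp
      have hxge : ¬ (x < r - 1) := by
        have h0 := List.head_dropWhile_not (fun x : Int => decide (x < r - 1)) hne
        have hhead : (L.dropWhile (fun x : Int => decide (x < r - 1))).head hne = x := by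
          simp [hdw]
        rw [hhead] at h0; simpa using h0
      have hxne : x ≠ r := fun he => hdisj r (by simp) (he ▸ hxL)
      have htge : ∀ y ∈ t, x ≤ y := (List.pairwise_cons.mp hL'pw).1
      have htpw : t.Pairwise (· ≤ ·) := (List.pairwise_cons.mp hL'pw).2
      have hnotPT : ∀ q, q ∈ P ∨ q ∈ L.takeWhile (fun x : Int => decide (x < r - 1)) → q < r - 1 := by
        rintro q (h1 | h1); exacts [hPlt q h1, hTlt q h1]
      have hLsplit : P ++ L = (P ++ L.takeWhile (fun x : Int => decide (x < r - 1))) ++ (x :: t) := by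
        conv_lhs => rw [← hsplit]
        rw [hdw, List.append_assoc]
      have hlen : L.length = (L.takeWhile (fun x : Int => decide (x < r - 1))).length + (t.length + 1) := by
        conv_lhs => rw [← hsplit]
        rw [hdw]; simp
      have hPT : ∀ q ∈ P ++ L.takeWhile (fun x : Int => decide (x < r - 1)), ∀ r' ∈ R', q < r' - 1 := by
        intro q hq r' hr'
        have := hnotPT q (List.mem_append.mp hq)
        have := hRle r' hr'; omega
      have hdisjt : ∀ r' ∈ R', r' ∉ t := by
        intro r' hr' hmem
        exact hdisj r' (by simp [hr']) (hmemL r' (by simp [hmem]))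
      by_cases hx1 : x = r - 1
      · have hc1 : (P ++ L).contains (r - 1) = true := by
          simp only [List.contains_eq_mem, decide_eq_true_eq]
          exact List.mem_append.mpr (Or.inr (hx1 ▸ hxL))
        have hnotin1 : (r - 1) ∉ P ++ L.takeWhile (fun x : Int => decide (x < r - 1)) := by
          intro hmem; have := hnotPT _ (List.mem_append.mp hmem); omega
        have herase : (P ++ L).erase (r - 1) = (P ++ L.takeWhile (fun x : Int => decide (x < r - 1))) ++ t := by
          rw [hLsplit, List.erase_append_right _ hnotin1, hx1, List.erase_cons_head]
        have hstep : stepA (P ++ L) r = (P ++ L.takeWhile (fun x : Int => decide (x < r - 1))) ++ t := by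
          unfold stepA; rw [hc1, if_pos rfl, herase]
        rw [hstep, go_cons_cons L r R' x t hdw, if_pos (Or.inl hx1)]
        have hrec := ih t (P ++ L.takeWhile (fun x : Int => decide (x < r - 1))) hPT htpw hR' hdisjt
        simp only [List.length_append] at hrec hlen ⊢
        omega
      · have hxgt : r + 1 ≤ x := by omega
        have hnc1 : (P ++ L).contains (r - 1) = false := by
          simp only [List.contains_eq_mem, decide_eq_false_iff_not]
          intro hmem
          rw [hLsplit] at hmem
          rcases List.mem_append.mp hmem with h1 | h1
          · have := hnotPT _ (List.mem_append.mp h1); omega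
          · rcases List.mem_cons.mp h1 with h2 | h2
            · omega
            · have := htge _ h2; omega
        by_cases hx2 : x = r + 1
        · have hc2 : (P ++ L).contains (r + 1) = true := by
            simp only [List.contains_eq_mem, decide_eq_true_eq]
            exact List.mem_append.mpr (Or.inr (hx2 ▸ hxL))
          have hnotin2 : (r + 1) ∉ P ++ L.takeWhile (fun x : Int => decide (x < r - 1)) := by
            intro hmem; have := hnotPT _ (List.mem_append.mp hmem); omega
          have herase : (P ++ L).erase (r + 1) = (P ++ L.takeWhile (fun x : Int => decide (x < r - 1))) ++ t := by
            rw [hLsplit, List.erase_append_right _ hnotin2, hx2, List.erase_cons_head]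
          have hstep : stepA (P ++ L) r = (P ++ L.takeWhile (fun x : Int => decide (x < r - 1))) ++ t := by
            unfold stepA; rw [hnc1, hc2]; simp [herase]
          rw [hstep, go_cons_cons L r R' x t hdw, if_pos (Or.inr hx2)]
          have hrec := ih t (P ++ L.takeWhile (fun x : Int => decide (x < r - 1))) hPT htpw hR' hdisjt
          simp only [List.length_append] at hrec hlen ⊢
          omega
        · have hnc2 : (P ++ L).contains (r + 1) = false := by
            simp only [List.contains_eq_mem, decide_eq_false_iff_not]
            intro hmem
            rw [hLsplit] at hmem
            rcases List.mem_append.mp hmem with h1 | h1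
            · have := hnotPT _ (List.mem_append.mp h1); omega
            · rcases List.mem_cons.mp h1 with h2 | h2
              · omega
              · have := htge _ h2; omega
          have hstep : stepA (P ++ L) r = P ++ L := by
            unfold stepA; rw [hnc1, hnc2]; simp
          rw [hstep, go_cons_cons L r R' x t hdw, if_neg (by tauto)]
          have hrec := ih (x :: t) (P ++ L.takeWhile (fun x : Int => decide (x < r - 1)))
            hPT hL'pw hR'
            (by intro r' hr' hmem
                exact hdisj r' (by simp [hr']) (hmemL r' hmem))
          rw [← hLsplit] at hrec
          simp only [List.length_append, List.length_cons] at hrec hlen ⊢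
          omega

theorem whileSkip_eq (L : List Int) (r : Int) (i : Nat) :
    whileSkip L r i = i + ((L.drop i).takeWhile (fun x => decide (x < r - 1))).length := by
  fun_induction whileSkip L r i with
  | case1 i h hlt ih =>
    have h2 : (L.drop i).takeWhile (fun x => decide (x < r - 1))
        = L[i] :: (L.drop (i+1)).takeWhile (fun x => decide (x < r - 1)) := by
      rw [List.drop_eq_getElem_cons h, List.takeWhile_cons, if_pos (by simpa using hlt)]
    rw [ih, h2, List.length_cons]; omega
  | case2 i h hlt =>
    have h2 : (L.drop i).takeWhile (fun x => decide (x < r - 1)) = [] := by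
      rw [List.drop_eq_getElem_cons h, List.takeWhile_cons, if_neg (by simpa using hlt)]
    rw [h2]; simp
  | case3 i h =>
    rw [List.drop_eq_nil_of_le (by omega)]
    simp

theorem dropWhile_eq_drop_len (l : List Int) (p : Int → Bool) :
    l.dropWhile p = l.drop (l.takeWhile p).length := by
  induction l with
  | nil => simp
  | cons x t ih =>
    by_cases h : p x
    · simp [List.takeWhile_cons, h, ih]
    · simp [List.dropWhile_cons, h]

theorem drop_whileSkip (L : List Int) (r : Int) (i : Nat) :
    L.drop (whileSkip L r i) = (L.drop i).dropWhile (fun x => decide (x < r - 1)) := by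
  rw [whileSkip_eq, dropWhile_eq_drop_len, ← List.drop_drop]

theorem foldlB_snd (L : List Int) (R : List Int) (i : Nat) (m : Int) :
    (R.foldl (stepB L) (i, m)).2 = m + go (L.drop i) R := by
  induction R generalizing i m with
  | nil => simp [go]
  | cons r R' ih =>
    rw [List.foldl_cons]
    have hd := drop_whileSkip L r i
    set j := whileSkip L r i with hj
    by_cases h : j < L.length
    · have hcons : L.drop j = L[j] :: L.drop (j + 1) := List.drop_eq_getElem_cons h
      by_cases hm : L[j] = r - 1 ∨ L[j] = r + 1
      · have hstep : stepB L (i, m) r = (j + 1, m + 1) := by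
          unfold stepB; simp only [← hj]; rw [dif_pos h, if_pos hm]
        rw [hstep, ih, go_cons, ← hd, hcons]
        simp [hm]
        omega
      · have hstep : stepB L (i, m) r = (j, m) := by
          unfold stepB; simp only [← hj]; rw [dif_pos h, if_neg hm]
        rw [hstep, ih, go_cons, ← hd, hcons]
        simp [hm]
    · have hnil : L.drop j = [] := List.drop_eq_nil_of_le (by omega)
      have hstep : stepB L (i, m) r = (j, m) := by
        unfold stepB; simp only [← hj]; rw [dif_neg h]
      rw [hstep, ih, go_cons, ← hd, hnil]

theorem setContains_ofList (xs : List Int) (x : Int) :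
    PySem.Set.contains (PySem.Set.ofList xs) x = xs.contains x := by
  rw [Bool.eq_iff_iff, PySem.Set.contains_iff, PySem.Set.mem_ofList, List.contains_eq_mem,
    decide_eq_true_eq]

-- ===== VERDICT (by name: the statement is the Claim_ definition above) =====
theorem solution_spec : Claim_equal_solution := by
  intro n lost reserve _
  unfold Spec_solution solution solution_alt
  simp only [setContains_ofList]
  set L := PySem.List.sorted (lost.filter (fun l => !(reserve.contains l))) (fun x => x) false with hLdef
  set R := PySem.List.sorted (reserve.filter (fun r => !(lost.contains r))) (fun x => x) false with hRdef
  have hL : L.Pairwise (· ≤ ·) := PySem.List.sorted_pairwise _ _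
  have hR : R.Pairwise (· ≤ ·) := PySem.List.sorted_pairwise _ _
  have hdisj : ∀ r ∈ R, r ∉ L := by
    intro r hr hrL
    have h1 : r ∈ reserve.filter (fun r => !(lost.contains r)) :=
      (PySem.List.mem_sorted _ _ _ _).mp hr
    have h2 : r ∈ lost.filter (fun l => !(reserve.contains l)) :=
      (PySem.List.mem_sorted _ _ _ _).mp hrL
    have h3 : r ∈ reserve := (List.mem_filter.mp h1).1
    have h4 := (List.mem_filter.mp h2).2
    simp only [Bool.not_eq_eq_eq_not, Bool.not_true, List.contains_eq_mem,
      decide_eq_false_iff_not] at h4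
    exact h4 h3
  have hA := foldlA_length R L [] (by simp) hL hR hdisj
  have hB := foldlB_snd L R 0 0
  simp only [List.nil_append, List.length_nil, Nat.zero_add, List.drop_zero, zero_add] at hA hB
  rw [hB]
  push_cast
  omega
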